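-- pv_equiv track=rewrite | github.com/tylanmm/comp_prog | codeforces/solved/buying_shovels.py | gf
-- ===== SOURCE A (Python) =====
-- from math import sqrt
--
-- def gf(n, k):
--     hi = 1
--     for i in range(1, min(k, int(sqrt(n)))+1):
--         if n % i == 0:
--             if n // i <= k:
--                 hi = max(hi, n//i)
--             else:
--                 hi = max(hi, i)
--     return hi
-- ===== SOURCE B (Python) =====
-- from math import sqrt
--
-- def gf(n, k):
--     # factor n into prime powers by removing each prime completely
--     m = n
--     factors = []
--     for p in range(2, int(sqrt(n)) + 1):
--         if m % p == 0:
--             e = 0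
--             while m % p == 0:
--                 m //= p
--                 e += 1
--             factors.append((p, e))
--     if m > 1:
--         factors.append((m, 1))
--     # multiply out every divisor of n from the prime powers
--     divisors = [1]
--     for q, e in factors:
--         divisors = [d * q ** j for d in divisors for j in range(e + 1)]
--     # answer: the largest divisor not exceeding k
--     best = 1
--     for d in divisors:
--         if best < d <= k:
--             best = d
--     return best
-- ===== Notes on version B (the rewrite author's own statement) =====
-- stated objective: alternative
-- what changed: B computes the answer via prime factorisation: it removes each prime completely (trial division with the quotient shrinking as factors are found), multiplies the prime powers back out into the full divisor list, and takes the largest divisor <= k in one final pass, instead of A's single loop over i up to min(k, sqrt(n)) with per-pair if/else selection of i versus n//i into a running maximum.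
import Mathlib
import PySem

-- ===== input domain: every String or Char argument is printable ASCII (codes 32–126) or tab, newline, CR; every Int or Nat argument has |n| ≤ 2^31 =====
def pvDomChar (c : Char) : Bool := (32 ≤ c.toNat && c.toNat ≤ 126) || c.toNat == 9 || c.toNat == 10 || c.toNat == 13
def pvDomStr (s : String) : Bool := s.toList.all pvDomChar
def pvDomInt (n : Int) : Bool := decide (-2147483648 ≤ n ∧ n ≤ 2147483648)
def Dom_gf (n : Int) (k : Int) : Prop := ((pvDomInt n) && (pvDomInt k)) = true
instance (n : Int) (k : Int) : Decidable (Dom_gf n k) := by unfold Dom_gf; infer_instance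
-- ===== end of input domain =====

-- B answers by prime-factorising n, multiplying out all divisors from the prime powers,
-- and taking the largest one ≤ k (objective: alternative algorithm); A instead trial-divides
-- i up to min(k, sqrt(n)) keeping a running maximum over the divisor pairs (i, n//i).

-- ===== PORT A =====
-- int(sqrt(n)) is ported as Nat.sqrt n.toNat: exact for 0 ≤ n ≤ 2^31 (a correctly rounded
-- double sqrt cannot cross an integer boundary there); negative n raises ValueError (excluded by Pre_gf).
def gf (n : Int) (k : Int) : Int :=
  (PySem.List.pyRange 1 (min k ((Nat.sqrt n.toNat : Nat) : Int) + 1)).foldl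
    (fun hi i =>
      if PySem.Int.mod n i = 0 then
        if PySem.Int.floordiv n i ≤ k then max hi (PySem.Int.floordiv n i)
        else max hi i
      else hi) 1

-- ===== PORT B =====
-- the inner `while m % p == 0: m //= p; e += 1` of Source B; the `2 ≤ p ∧ 1 ≤ m` conjuncts of the
-- guard only make the recursion total (they hold at every reachable call; Python's loop would
-- not terminate on m = 0, which is unreachable since the outer loop keeps 1 ≤ m).
-- termination helper for extractP (cited by its decreasing_by)
theorem pvEdivLt {m p : Int} (hm : 1 ≤ m) (hp : 2 ≤ p) : 0 ≤ m / p ∧ m / p < m := by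
  have hm0 : m = ((m.toNat : Nat) : Int) := (Int.toNat_of_nonneg (by omega)).symm
  have hp0 : p = ((p.toNat : Nat) : Int) := (Int.toNat_of_nonneg (by omega)).symm
  have h := Nat.div_lt_self (by omega : 0 < m.toNat) (by omega : 1 < p.toNat)
  have e : m / p = ((m.toNat / p.toNat : Nat) : Int) := by
    rw [hm0, hp0]; exact (Int.natCast_ediv _ _).symm
  revert e h
  generalize (m.toNat / p.toNat) = X
  intro e h
  omega

def extractP (p : Int) (m : Int) (e : Int) : Int × Int :=
  if h : PySem.Int.mod m p = 0 ∧ 2 ≤ p ∧ 1 ≤ m then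
    extractP p (PySem.Int.floordiv m p) (e + 1)
  else (m, e)
termination_by m.toNat
decreasing_by
  obtain ⟨h0, hp, hm⟩ := h
  rw [PySem.Int.floordiv_eq_ediv_of_pos (by omega)]
  have := pvEdivLt hm hp
  omega

-- body of Source B's factorising `for p in range(2, int(sqrt(n)) + 1)` loop
def facStep (st : Int × List (Int × Int)) (p : Int) : Int × List (Int × Int) :=
  if PySem.Int.mod st.1 p = 0 then
    let r := extractP p st.1 0
    (r.1, st.2 ++ [(p, r.2)])
  else st

-- Source B's `for q, e in factors: divisors = [d * q ** j for d in divisors for j in range(e + 1)]`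
def genD (fs : List (Int × Int)) : List Int :=
  fs.foldl
    (fun ds qe => ds.flatMap (fun d => (PySem.List.pyRange 0 (qe.2 + 1)).map (fun j => d * qe.1 ^ j.toNat)))
    [1]

-- Source B's final `best` loop
def bestD (k : Int) (ds : List Int) : Int :=
  ds.foldl (fun best d => if best < d ∧ d ≤ k then d else best) 1

def gf_alt (n : Int) (k : Int) : Int :=
  let fm := (PySem.List.pyRange 2 (((Nat.sqrt n.toNat : Nat) : Int) + 1)).foldl facStep (n, [])
  let factors := if 1 < fm.1 then fm.2 ++ [(fm.1, 1)] else fm.2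
  bestD k (genD factors)

-- ===== PRECONDITION & SPEC =====
-- math.sqrt raises ValueError on negative n (both A and B raise there); no other input raises.
def Pre_gf (n : Int) (k : Int) : Prop := 0 ≤ n
instance (n : Int) (k : Int) : Decidable (Pre_gf n k) := by unfold Pre_gf; infer_instance
def pvWitness_gf : Int × Int := (36, 7)
def Spec_gf (n : Int) (k : Int) (out : Int) : Prop := out = gf_alt n k
instance (n : Int) (k : Int) (out : Int) : Decidable (Spec_gf n k out) := by unfold Spec_gf; infer_instance

-- ===== CLAIM (what is proved, stated in full; the proofs are below) =====
def Claim_equal_gf : Prop := ∀ (n : Int) (k : Int), Dom_gf n k → Pre_gf n k → Spec_gf n k (gf n k)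

-- ===== LEMMAS AND PROOFS =====

-- "r is the largest divisor of n not exceeding k, defaulting to 1"
def IsBest (n k r : Int) : Prop :=
  1 ≤ r ∧ (r = 1 ∨ (r ∣ n ∧ r ≤ k)) ∧ ∀ d : Int, d ∣ n → 1 ≤ d → d ≤ k → d ≤ r

theorem best_unique {n k r1 r2 : Int} (h1 : IsBest n k r1) (h2 : IsBest n k r2) : r1 = r2 := by
  obtain ⟨a1, b1, c1⟩ := h1
  obtain ⟨a2, b2, c2⟩ := h2
  have l12 : r1 ≤ r2 := by
    rcases b1 with h | ⟨hd, hk⟩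
    · omega
    · exact c2 _ hd a1 hk
  have l21 : r2 ≤ r1 := by
    rcases b2 with h | ⟨hd, hk⟩
    · omega
    · exact c1 _ hd a2 hk
  omega

-- ---------- A-side: the running-max-over-selected-indices fold ----------
theorem fold_sel_init_le (g : Int → Int) (c : Int → Prop) [DecidablePred c] :
    ∀ (L : List Int) (a : Int), a ≤ L.foldl (fun hi i => if c i then max hi (g i) else hi) a := by
  intro L
  induction L with
  | nil => intro a; simp
  | cons x t ih =>
    intro a
    simp only [List.foldl_cons]
    refine le_trans ?_ (ih _)
    split <;> simp

theorem fold_sel_ub (g : Int → Int) (c : Int → Prop) [DecidablePred c] :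
    ∀ (L : List Int) (a i : Int), i ∈ L → c i →
      g i ≤ L.foldl (fun hi j => if c j then max hi (g j) else hi) a := by
  intro L
  induction L with
  | nil => intro a i h; simp at h
  | cons x t ih =>
    intro a i hmem hc
    simp only [List.foldl_cons]
    rcases List.mem_cons.mp hmem with h | h
    · subst h
      refine le_trans ?_ (fold_sel_init_le g c t _)
      simp [hc]
    · exact ih _ i h hc

theorem fold_sel_cases (g : Int → Int) (c : Int → Prop) [DecidablePred c] :
    ∀ (L : List Int) (a : Int),
      L.foldl (fun hi i => if c i then max hi (g i) else hi) a = a ∨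
      ∃ i ∈ L, c i ∧ L.foldl (fun hi i => if c i then max hi (g i) else hi) a = g i := by
  intro L
  induction L with
  | nil => intro a; left; rfl
  | cons x t ih =>
    intro a
    simp only [List.foldl_cons]
    by_cases hc : c x
    · simp only [if_pos hc]
      rcases ih (max a (g x)) with h | ⟨i, hi, hci, h⟩
      · rw [h]
        rcases le_total a (g x) with hle | hle
        · right; exact ⟨x, List.mem_cons_self, hc, max_eq_right hle⟩
        · left; exact max_eq_left hle
      · right; exact ⟨i, List.mem_cons_of_mem _ hi, hci, h⟩
    · simp only [if_neg hc]
      rcases ih a with h | ⟨i, hi, hci, h⟩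
      · left; exact h
      · right; exact ⟨i, List.mem_cons_of_mem _ hi, hci, h⟩

-- ---------- arithmetic toolbox about s = Nat.sqrt n.toNat ----------
theorem sq_le_of_le_sqrt {n i : Int} (hn : 0 ≤ n) (hi : 0 ≤ i)
    (h : i ≤ ((Nat.sqrt n.toNat : Nat) : Int)) : i * i ≤ n := by
  have h1 : (Nat.sqrt n.toNat) ^ 2 ≤ n.toNat := Nat.sqrt_le' _
  have h2 : ((Nat.sqrt n.toNat : Nat) : Int) * ((Nat.sqrt n.toNat : Nat) : Int) ≤ n := by
    have := Int.toNat_of_nonneg hn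
    push_cast [pow_two] at h1
    omega
  calc i * i ≤ ((Nat.sqrt n.toNat : Nat) : Int) * ((Nat.sqrt n.toNat : Nat) : Int) :=
        mul_le_mul h h hi (by positivity)
    _ ≤ n := h2

theorem le_sqrt_of_sq_le {n i : Int} (hn : 0 ≤ n) (h : i * i ≤ n) (hi : 0 ≤ i) :
    i ≤ ((Nat.sqrt n.toNat : Nat) : Int) := by
  by_contra hlt
  push_neg at hlt
  have h1 : n.toNat < (Nat.sqrt n.toNat).succ ^ 2 := Nat.lt_succ_sqrt' _
  have h2 : n < (((Nat.sqrt n.toNat : Nat) : Int) + 1) * (((Nat.sqrt n.toNat : Nat) : Int) + 1) := by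
    have := Int.toNat_of_nonneg hn
    push_cast [pow_two, Nat.succ_eq_add_one] at h1
    nlinarith
  have hge : ((Nat.sqrt n.toNat : Nat) : Int) + 1 ≤ i := hlt
  have : (((Nat.sqrt n.toNat : Nat) : Int) + 1) * (((Nat.sqrt n.toNat : Nat) : Int) + 1) ≤ i * i :=
    mul_le_mul hge hge (by positivity) (le_trans (by positivity) hge)
  linarith

-- ---------- divisor facts over Int ----------
theorem ediv_ge_one {n d : Int} (hn : 1 ≤ n) (hd1 : 1 ≤ d) (hdn : d ≤ n) : 1 ≤ n / d := by
  exact Int.le_ediv_iff_mul_le (by omega) |>.mpr (by omega)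

theorem div_le_of_dvd_le {n d : Int} (hn : 1 ≤ n) (hd : d ∣ n) (hd1 : 1 ≤ d) : d ≤ n :=
  Int.le_of_dvd (by omega) hd

theorem ediv_dvd_of_dvd {n d : Int} (hd : d ∣ n) : (n / d) ∣ n := by
  rcases eq_or_ne d 0 with h | h
  · subst h; simpa using hd
  · obtain ⟨c, rfl⟩ := hd
    rw [Int.mul_ediv_cancel_left _ h]
    exact Dvd.intro_left d rfl

theorem ediv_ediv_self {n d : Int} (hd : d ∣ n) (h0 : d ≠ 0) (hq0 : n / d ≠ 0) :
    n / (n / d) = d := by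
  obtain ⟨c, rfl⟩ := hd
  rw [Int.mul_ediv_cancel_left _ h0] at hq0 ⊢
  rw [mul_comm, Int.mul_ediv_cancel_left _ hq0]

theorem div_ge_self_sqrt {n i : Int} (hn : 0 ≤ n) (h1 : 1 ≤ i)
    (h2 : i ≤ ((Nat.sqrt n.toNat : Nat) : Int)) : i ≤ n / i :=
  (Int.le_ediv_iff_mul_le (by omega)).mpr (sq_le_of_le_sqrt hn (by omega) h2)

-- every divisor 1 ≤ d of n has a witness i ≤ min(d, sqrt n) with d ∈ {i, n/i}
theorem div_mem_divisors {n d : Int} (hn : 1 ≤ n) (hd : d ∣ n) (hd1 : 1 ≤ d) :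
    ∃ i, (1 ≤ i ∧ i ≤ ((Nat.sqrt n.toNat : Nat) : Int) ∧ i ≤ d) ∧ i ∣ n ∧ (d = i ∨ d = n / i) := by
  by_cases hs : d ≤ ((Nat.sqrt n.toNat : Nat) : Int)
  · exact ⟨d, ⟨hd1, hs, le_refl d⟩, hd, Or.inl rfl⟩
  · push_neg at hs
    have hdn : d ≤ n := div_le_of_dvd_le hn hd hd1
    have hq1 : 1 ≤ n / d := ediv_ge_one hn hd1 hdn
    have hmul : (n / d) * d = n := Int.ediv_mul_cancel hd
    have hqd : n / d ≤ d := by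
      by_contra hcon
      push_neg at hcon
      have hdd : d * d ≤ n := by nlinarith
      exact absurd (le_sqrt_of_sq_le (by omega) hdd (by omega)) (by omega)
    have hqq : (n / d) * (n / d) ≤ n := by nlinarith
    have hqs : n / d ≤ ((Nat.sqrt n.toNat : Nat) : Int) :=
      le_sqrt_of_sq_le (by omega) hqq (by omega)
    refine ⟨n / d, ⟨hq1, hqs, by omega⟩, ediv_dvd_of_dvd hd, Or.inr ?_⟩
    exact (ediv_ediv_self hd (by omega) (by omega)).symm

-- ---------- A is the largest divisor ≤ k ----------
theorem gf_IsBest (n k : Int) (hn : 1 ≤ n) : IsBest n k (gf n k) := by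
  have hn0 : (0:Int) ≤ n := by omega
  set s : Int := ((Nat.sqrt n.toNat : Nat) : Int) with hs
  set c : Int → Prop := fun i => PySem.Int.mod n i = 0 with hc
  set g : Int → Int := fun i =>
    if PySem.Int.floordiv n i ≤ k then PySem.Int.floordiv n i else i with hg
  set LA : List Int := PySem.List.pyRange 1 (min k s + 1) with hLA
  have hA : gf n k = LA.foldl (fun hi i => if c i then max hi (g i) else hi) 1 := by
    unfold gf
    congr 1
    funext hi i
    show _ = if c i then max hi (g i) else hi
    by_cases h1 : PySem.Int.mod n i = 0 <;> by_cases h2 : PySem.Int.floordiv n i ≤ k <;>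
      simp [hc, hg, h1, h2]
  refine ⟨?_, ?_, ?_⟩
  · rw [hA]; exact fold_sel_init_le g c LA 1
  · rcases fold_sel_cases g c LA 1 with h | ⟨i, hiL, hci, h⟩
    · rw [hA, h]; exact Or.inl rfl
    · rw [hLA, PySem.List.mem_pyRange_one] at hiL
      obtain ⟨hi1, hi2⟩ := hiL
      have hdvd : i ∣ n := (PySem.Int.mod_eq_zero_iff_dvd n i).mp hci
      have hfd : PySem.Int.floordiv n i = n / i :=
        PySem.Int.floordiv_eq_ediv_of_pos (by omega)
      right
      rw [hA, h, hg]
      simp only [hfd]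
      by_cases hq : n / i ≤ k
      · rw [if_pos hq]; exact ⟨ediv_dvd_of_dvd hdvd, hq⟩
      · rw [if_neg hq]; exact ⟨hdvd, by omega⟩
  · intro d hd hd1 hdk
    obtain ⟨i, ⟨hi1, his, hid⟩, hidvd, hcase⟩ := div_mem_divisors hn hd hd1
    rw [← hs] at his
    have hci : c i := (PySem.Int.mod_eq_zero_iff_dvd n i).mpr hidvd
    have hfd : PySem.Int.floordiv n i = n / i :=
      PySem.Int.floordiv_eq_ediv_of_pos (by omega)
    have hiq : i ≤ n / i := div_ge_self_sqrt hn0 hi1 (hs ▸ his)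
    have hiLA : i ∈ LA := by
      rw [hLA, PySem.List.mem_pyRange_one]; omega
    have hub := fold_sel_ub g c LA 1 i hiLA hci
    rw [← hA] at hub
    refine le_trans ?_ hub
    rw [hg]
    simp only [hfd]
    rcases hcase with hh | hh
    · subst hh
      by_cases hq : n / d ≤ k
      · rw [if_pos hq]; exact hiq
      · rw [if_neg hq]
    · by_cases hq : n / i ≤ k
      · rw [if_pos hq]; omega
      · omega

-- ---------- B-side: the final running-best fold ----------
theorem bfold_init_le (k : Int) :
    ∀ (L : List Int) (a : Int), a ≤ L.foldl (fun best d => if best < d ∧ d ≤ k then d else best) a := by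
  intro L
  induction L with
  | nil => intro a; simp
  | cons x t ih =>
    intro a
    simp only [List.foldl_cons]
    refine le_trans ?_ (ih _)
    split <;> omega

theorem bfold_cases (k : Int) :
    ∀ (L : List Int) (a : Int),
      L.foldl (fun best d => if best < d ∧ d ≤ k then d else best) a = a ∨
      (L.foldl (fun best d => if best < d ∧ d ≤ k then d else best) a ∈ L ∧
        L.foldl (fun best d => if best < d ∧ d ≤ k then d else best) a ≤ k) := by
  intro L
  induction L with
  | nil => intro a; left; rfl
  | cons x t ih =>
    intro a
    simp only [List.foldl_cons]
    by_cases hc : a < x ∧ x ≤ k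
    · rw [if_pos hc]
      rcases ih x with h | ⟨h1, h2⟩
      · right; rw [h]; exact ⟨List.mem_cons_self, hc.2⟩
      · right; exact ⟨List.mem_cons_of_mem _ h1, h2⟩
    · rw [if_neg hc]
      rcases ih a with h | ⟨h1, h2⟩
      · left; exact h
      · right; exact ⟨List.mem_cons_of_mem _ h1, h2⟩

theorem bfold_ub (k : Int) :
    ∀ (L : List Int) (a d : Int), d ∈ L → d ≤ k →
      d ≤ L.foldl (fun best d => if best < d ∧ d ≤ k then d else best) a := by
  intro L
  induction L with
  | nil => intro a d h; simp at h
  | cons x t ih =>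
    intro a d hmem hdk
    simp only [List.foldl_cons]
    rcases List.mem_cons.mp hmem with h | h
    · subst h
      by_cases hc : a < d ∧ d ≤ k
      · rw [if_pos hc]; exact bfold_init_le k t d
      · rw [if_neg hc]
        refine le_trans ?_ (bfold_init_le k t a)
        omega
    · exact ih _ d h hdk

-- ---------- number theory for the factorisation ----------
theorem extractP_spec :
    ∀ (N : Nat) (p m e : Int), m.toNat ≤ N → 2 ≤ p → 1 ≤ m →
      ∃ (j : Nat) (m' : Int), extractP p m e = (m', e + (j : Int)) ∧
        m = p ^ j * m' ∧ ¬ p ∣ m' ∧ 1 ≤ m' := by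
  intro N
  induction N with
  | zero => intro p m e hN hp hm; omega
  | succ N ih =>
    intro p m e hN hp hm
    rw [extractP]
    by_cases h0 : PySem.Int.mod m p = 0
    · rw [dif_pos ⟨h0, hp, hm⟩]
      have hpd : p ∣ m := (PySem.Int.mod_eq_zero_iff_dvd m p).mp h0
      have hfd : PySem.Int.floordiv m p = m / p := PySem.Int.floordiv_eq_ediv_of_pos (by omega)
      have hple : p ≤ m := Int.le_of_dvd (by omega) hpd
      have hmp1 : 1 ≤ m / p := Int.le_ediv_iff_mul_le (by omega) |>.mpr (by omega)
      have hlt := pvEdivLt hm hp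
      rw [hfd]
      obtain ⟨j, m', heq, hfac, hnd, hm'⟩ := ih p (m / p) (e + 1) (by omega) hp hmp1
      refine ⟨j + 1, m', ?_, ?_, hnd, hm'⟩
      · rw [heq]; congr 1; push_cast; ring
      · have hme : m / p * p = m := Int.ediv_mul_cancel hpd
        rw [hfac] at hme
        rw [← hme, pow_succ]; ring
    · rw [dif_neg (fun hh => h0 hh.1)]
      exact ⟨0, m, by simp, by simp,
        fun hd => h0 ((PySem.Int.mod_eq_zero_iff_dvd m p).mpr hd), hm⟩

theorem prime_of_no_small {p m : Int} (hp : 2 ≤ p) (hm : 1 ≤ m) (hpm : p ∣ m)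
    (hsmall : ∀ q : Int, 2 ≤ q → q < p → ¬ q ∣ m) : p.natAbs.Prime := by
  have hP2 : 2 ≤ p.natAbs := by omega
  have hq := Nat.minFac_prime (n := p.natAbs) (by omega)
  have hqle : p.natAbs.minFac ≤ p.natAbs := Nat.minFac_le (by omega)
  by_cases hlt : p.natAbs.minFac < p.natAbs
  · exfalso
    have hdm : (p.natAbs.minFac : Int) ∣ m := by
      have h1 : p.natAbs.minFac ∣ m.natAbs :=
        dvd_trans (Nat.minFac_dvd _) (Int.natAbs_dvd_natAbs.mpr hpm)
      have h2 : ((p.natAbs.minFac : Nat) : Int) ∣ ((m.natAbs : Nat) : Int) :=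
        Int.natCast_dvd_natCast.mpr h1
      rwa [Int.natAbs_of_nonneg (by omega)] at h2
    exact hsmall (p.natAbs.minFac) (by exact_mod_cast hq.two_le) (by omega) hdm
  · have he : p.natAbs.minFac = p.natAbs := by omega
    rwa [he] at hq

theorem nat_combine {p C : Nat} (hp : p.Prime) (hpC : ¬ p ∣ C) (j : Nat) (d : Nat) (hd : 0 < d)
    (h : d ∣ C * p ^ j) : ∃ x : Nat, x ∣ C ∧ ∃ i : Nat, i ≤ j ∧ d = x * p ^ i := by
  set i := d.factorization p with hi
  have h1 : p ^ i ∣ d := Nat.ordProj_dvd d p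
  set x := d / p ^ i with hx
  have hxd : p ^ i * x = d := Nat.ordProj_mul_ordCompl_eq_self d p
  have hpx : ¬ p ∣ x := Nat.not_dvd_ordCompl hp (by omega)
  have hcpC : Nat.Coprime p C := (hp.coprime_iff_not_dvd).mpr hpC
  have hcpx : Nat.Coprime p x := (hp.coprime_iff_not_dvd).mpr hpx
  have h2 : p ^ i ∣ C * p ^ j := h1.trans h
  have h3 : p ^ i ∣ p ^ j := (Nat.Coprime.pow_left i hcpC).dvd_of_dvd_mul_left h2
  have hij : i ≤ j := (Nat.pow_dvd_pow_iff_le_right hp.one_lt).mp h3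
  have hxdvd : x ∣ C * p ^ j := (Dvd.intro_left (p ^ i) hxd).trans h
  have hxC : x ∣ C := ((hcpx.symm).pow_right j).dvd_of_dvd_mul_right hxdvd
  exact ⟨x, hxC, i, hij, by rw [← hxd]; ring⟩

theorem int_combine {p C : Int} (hp : 2 ≤ p) (hprime : p.natAbs.Prime)
    (hC : 1 ≤ C) (hpC : ¬ p ∣ C) (j : Nat) (d : Int) :
    (1 ≤ d ∧ d ∣ C * p ^ j) ↔ ∃ x : Int, (1 ≤ x ∧ x ∣ C) ∧ ∃ i : Nat, i ≤ j ∧ d = x * p ^ i := by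
  constructor
  · rintro ⟨hd1, hdvd⟩
    have h1 : d.natAbs ∣ C.natAbs * p.natAbs ^ j := by
      have h := Int.natAbs_dvd_natAbs.mpr hdvd
      rwa [Int.natAbs_mul, Int.natAbs_pow] at h
    have hpCn : ¬ p.natAbs ∣ C.natAbs := fun h => hpC (Int.natAbs_dvd_natAbs.mp h)
    obtain ⟨x, hxC, i, hij, hd⟩ := nat_combine hprime hpCn j d.natAbs (by omega) h1
    have hx0 : 0 < x := by
      rcases Nat.eq_zero_or_pos x with h | h
      · exfalso; rw [h] at hd; simp at hd; omega
      · exact h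
    refine ⟨(x : Int), ⟨by omega, ?_⟩, i, hij, ?_⟩
    · have h2 : ((x : Nat) : Int) ∣ ((C.natAbs : Nat) : Int) := Int.natCast_dvd_natCast.mpr hxC
      rwa [Int.natAbs_of_nonneg (by omega)] at h2
    · have h3 : d = ((d.natAbs : Nat) : Int) := by omega
      rw [h3, hd]
      push_cast
      congr 1
      rw [abs_of_nonneg (by omega : (0:Int) ≤ p)]
  · rintro ⟨x, ⟨hx1, hxC⟩, i, hij, rfl⟩
    have hpi : (1 : Int) ≤ p ^ i := one_le_pow₀ (by omega)
    refine ⟨by nlinarith, mul_dvd_mul hxC (pow_dvd_pow p hij)⟩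

-- ---------- the divisor-generation fold ----------
theorem genD_append (fs : List (Int × Int)) (qe : Int × Int) :
    genD (fs ++ [qe]) =
      (genD fs).flatMap (fun d => (PySem.List.pyRange 0 (qe.2 + 1)).map (fun j => d * qe.1 ^ j.toNat)) := by
  unfold genD
  rw [List.foldl_append]
  rfl

theorem mem_genStep {ds : List Int} {p e d : Int} (he : 0 ≤ e) :
    (d ∈ ds.flatMap (fun x => (PySem.List.pyRange 0 (e + 1)).map (fun j => x * p ^ j.toNat))) ↔
      ∃ x ∈ ds, ∃ i : Nat, (i : Int) ≤ e ∧ d = x * p ^ i := by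
  simp only [List.mem_flatMap, List.mem_map, PySem.List.mem_pyRange_one]
  constructor
  · rintro ⟨x, hx, j, ⟨hj0, hj1⟩, rfl⟩
    exact ⟨x, hx, j.toNat, by omega, rfl⟩
  · rintro ⟨x, hx, i, hi, rfl⟩
    exact ⟨x, hx, (i : Int), ⟨by omega, by omega⟩, by simp⟩

theorem invstep_gen {C p : Int} (j : Nat) {fs : List (Int × Int)}
    (hgen : ∀ d : Int, d ∈ genD fs ↔ (1 ≤ d ∧ d ∣ C))
    (hC : 1 ≤ C) (hp : 2 ≤ p) (hprime : p.natAbs.Prime) (hpC : ¬ p ∣ C) :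
    ∀ d : Int, d ∈ genD (fs ++ [(p, (j : Int))]) ↔ (1 ≤ d ∧ d ∣ C * p ^ j) := by
  intro d
  rw [genD_append]
  dsimp only
  rw [mem_genStep (by positivity), int_combine hp hprime hC hpC j d]
  constructor
  · rintro ⟨x, hx, i, hi, rfl⟩
    exact ⟨x, (hgen x).mp hx, i, by exact_mod_cast hi, rfl⟩
  · rintro ⟨x, hx, i, hi, rfl⟩
    exact ⟨x, (hgen x).mpr hx, i, by exact_mod_cast hi, rfl⟩

-- ---------- the factorising loop invariant ----------
def InvP (n p m C : Int) (fs : List (Int × Int)) : Prop :=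
  C * m = n ∧ 1 ≤ m ∧ 1 ≤ C ∧
  (∀ q : Int, 2 ≤ q → q < p → ¬ q ∣ m) ∧
  Nat.Coprime m.natAbs C.natAbs ∧
  (∀ d : Int, d ∈ genD fs ↔ (1 ≤ d ∧ d ∣ C))

theorem loop_inv (n : Int) (hn : 1 ≤ n) : ∀ t : Nat,
    ∃ C : Int,
      InvP n (2 + (t : Int))
        ((PySem.List.pyRange 2 (2 + (t : Int))).foldl facStep (n, [])).1 C
        ((PySem.List.pyRange 2 (2 + (t : Int))).foldl facStep (n, [])).2 := by
  intro t
  induction t with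
  | zero =>
    refine ⟨1, ?_⟩
    rw [PySem.List.pyRange_one_eq_nil (by norm_num)]
    simp only [List.foldl_nil]
    refine ⟨by ring, hn, le_refl 1, fun q hq1 hq2 => by omega, Nat.coprime_one_right _, ?_⟩
    intro d
    unfold genD
    simp only [List.foldl_nil, List.mem_singleton]
    constructor
    · rintro rfl; exact ⟨le_refl 1, one_dvd 1⟩
    · rintro ⟨h1, h2⟩
      have := Int.le_of_dvd one_pos h2
      omega
  | succ t ih =>
    obtain ⟨C, hCm, hm1, hC1, hsmall, hcop, hgen⟩ := ih
    set p : Int := 2 + (t : Int) with hp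
    have hp2 : 2 ≤ p := by omega
    have hrange : PySem.List.pyRange 2 (2 + ((t + 1 : Nat) : Int)) =
        PySem.List.pyRange 2 (2 + (t : Int)) ++ [p] := by
      have h1 : (2 : Int) + ((t + 1 : Nat) : Int) = (2 + (t : Int)) + 1 := by push_cast; ring
      rw [h1, PySem.List.pyRange_one_succ_right (by omega)]
    rw [hrange, List.foldl_append]
    simp only [List.foldl_cons, List.foldl_nil]
    set st := (PySem.List.pyRange 2 (2 + (t : Int))).foldl facStep
      (n, ([] : List (Int × Int))) with hst
    have hnext : (2 : Int) + ((t + 1 : Nat) : Int) = p + 1 := by push_cast; omega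
    rw [hnext]
    unfold facStep
    by_cases h0 : PySem.Int.mod st.1 p = 0
    · rw [if_pos h0]
      have hpd : p ∣ st.1 := (PySem.Int.mod_eq_zero_iff_dvd st.1 p).mp h0
      obtain ⟨j, m', heq, hfac, hnd, hm'⟩ :=
        extractP_spec st.1.toNat p st.1 0 (le_refl _) hp2 hm1
      have hprime : p.natAbs.Prime := prime_of_no_small hp2 hm1 hpd hsmall
      have hpC : ¬ p ∣ C := by
        intro hdC
        have h1 : p.natAbs ∣ st.1.natAbs := Int.natAbs_dvd_natAbs.mpr hpd
        have h2 : p.natAbs ∣ C.natAbs := Int.natAbs_dvd_natAbs.mpr hdC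
        have h3 : p.natAbs ∣ Nat.gcd st.1.natAbs C.natAbs := Nat.dvd_gcd h1 h2
        rw [hcop] at h3
        have := Nat.dvd_one.mp h3
        omega
      have hpj1 : (1 : Int) ≤ p ^ j := one_le_pow₀ (by omega)
      refine ⟨C * p ^ j, ?_, ?_, ?_, ?_, ?_, ?_⟩
      · rw [heq]
        simp only []
        rw [mul_assoc, ← hfac]
        exact hCm
      · rw [heq]; exact hm'
      · nlinarith
      · rw [heq]
        simp only []
        intro q hq1 hq2
        rcases eq_or_lt_of_le (by omega : q ≤ p) with hq | hq
        · subst hq; exact hnd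
        · intro hdq
          have hm'd : m' ∣ st.1 := Dvd.intro_left (p ^ j) hfac.symm
          exact hsmall q hq1 hq (hdq.trans hm'd)
      · rw [heq]
        simp only []
        rw [Int.natAbs_mul, Int.natAbs_pow]
        apply Nat.Coprime.mul_right
        · have hm'd : m'.natAbs ∣ st.1.natAbs :=
            Int.natAbs_dvd_natAbs.mpr (Dvd.intro_left (p ^ j) hfac.symm)
          exact Nat.Coprime.coprime_dvd_left hm'd hcop
        · have hpm' : ¬ p.natAbs ∣ m'.natAbs := fun h => hnd (Int.natAbs_dvd_natAbs.mp h)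
          exact ((hprime.coprime_iff_not_dvd).mpr hpm').symm.pow_right j
      · rw [heq]
        simp only [zero_add]
        exact invstep_gen j hgen hC1 hp2 hprime hpC
    · rw [if_neg h0]
      refine ⟨C, hCm, hm1, hC1, ?_, hcop, hgen⟩
      intro q hq1 hq2
      rcases eq_or_lt_of_le (by omega : q ≤ p) with hq | hq
      · subst hq
        exact fun hd => h0 ((PySem.Int.mod_eq_zero_iff_dvd st.1 p).mpr hd)
      · exact hsmall q hq1 hq

-- the leftover cofactor after the loop is prime
theorem leftover_prime {m n : Int} (hm : 1 < m) (hmn : m ∣ n) (hn : 1 ≤ n)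
    (hsmall : ∀ q : Int, 2 ≤ q → q < ((Nat.sqrt n.toNat : Nat) : Int) + 1 → ¬ q ∣ m) :
    m.natAbs.Prime := by
  set q := m.natAbs.minFac with hq
  have hqp : q.Prime := Nat.minFac_prime (by omega)
  have hqdm : q ∣ m.natAbs := Nat.minFac_dvd _
  have hqdmi : (q : Int) ∣ m := by
    have h2 : ((q : Nat) : Int) ∣ ((m.natAbs : Nat) : Int) := Int.natCast_dvd_natCast.mpr hqdm
    rwa [Int.natAbs_of_nonneg (by omega)] at h2
  by_cases hlt : q < m.natAbs
  · exfalso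
    -- m / q is a divisor of m with 2 ≤ m/q, so q ≤ m/q hence q² ≤ m ≤ n
    have hco : m.natAbs / q ∣ m.natAbs := Nat.div_dvd_of_dvd hqdm
    have hcone : m.natAbs / q ≠ 1 := by
      intro h1
      have := Nat.div_mul_cancel hqdm
      rw [h1, one_mul] at this
      omega
    have hco2 : 2 ≤ m.natAbs / q := by
      have h0 : 0 < m.natAbs / q := Nat.div_pos (Nat.le_of_dvd (by omega) hqdm) (by
        have := hqp.two_le; omega)
      omega
    have hqle : q ≤ m.natAbs / q := Nat.minFac_le_of_dvd hco2 hco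
    have hsq : q * q ≤ m.natAbs := by
      calc q * q ≤ q * (m.natAbs / q) := Nat.mul_le_mul_left q hqle
        _ = m.natAbs := Nat.mul_div_cancel' hqdm
    have hmn' : m.natAbs ≤ n.toNat := by
      have := Int.le_of_dvd (by omega) hmn
      omega
    have hqsqrt : q ≤ Nat.sqrt n.toNat := Nat.le_sqrt.mpr (by omega)
    exact hsmall (q : Int) (by exact_mod_cast hqp.two_le) (by omega) hqdmi
  · have : q = m.natAbs := by
      have := Nat.minFac_le (n := m.natAbs) (by omega)
      omega
    rwa [← this]

-- membership in B's generated divisor list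
theorem mem_divisors (n : Int) (hn : 1 ≤ n) :
    ∀ d : Int,
      (d ∈ genD
        (if 1 < ((PySem.List.pyRange 2 (((Nat.sqrt n.toNat : Nat) : Int) + 1)).foldl facStep (n, [])).1 then
          ((PySem.List.pyRange 2 (((Nat.sqrt n.toNat : Nat) : Int) + 1)).foldl facStep (n, [])).2 ++
            [(((PySem.List.pyRange 2 (((Nat.sqrt n.toNat : Nat) : Int) + 1)).foldl facStep (n, [])).1, 1)]
        else ((PySem.List.pyRange 2 (((Nat.sqrt n.toNat : Nat) : Int) + 1)).foldl facStep (n, [])).2))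
      ↔ (1 ≤ d ∧ d ∣ n) := by
  have hs1 : 1 ≤ Nat.sqrt n.toNat := by
    have h1 : 1 ≤ n.toNat := by omega
    have := Nat.sqrt_le_sqrt h1
    simpa using this
  have ht : ((Nat.sqrt n.toNat : Nat) : Int) + 1 = 2 + ((Nat.sqrt n.toNat - 1 : Nat) : Int) := by
    omega
  obtain ⟨C, hCm, hm1, hC1, hsmall, hcop, hgen⟩ := loop_inv n hn (Nat.sqrt n.toNat - 1)
  rw [← ht] at hCm
  rw [← ht] at hm1
  rw [← ht] at hsmall
  rw [← ht] at hcop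
  rw [← ht] at hgen
  set st := (PySem.List.pyRange 2 (((Nat.sqrt n.toNat : Nat) : Int) + 1)).foldl facStep
    (n, ([] : List (Int × Int))) with hst
  by_cases hbig : 1 < st.1
  · rw [if_pos hbig]
    have hdvd_n : st.1 ∣ n := ⟨C, by rw [← hCm]; ring⟩
    have hprime : st.1.natAbs.Prime := leftover_prime hbig hdvd_n hn hsmall
    have hpC : ¬ st.1 ∣ C := by
      intro hdC
      have h2 : st.1.natAbs ∣ C.natAbs := Int.natAbs_dvd_natAbs.mpr hdC
      have h3 : st.1.natAbs ∣ Nat.gcd st.1.natAbs C.natAbs := Nat.dvd_gcd dvd_rfl h2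
      rw [hcop] at h3
      have := Nat.dvd_one.mp h3
      omega
    intro d
    have h := invstep_gen 1 hgen hC1 (by omega) hprime hpC d
    rw [show ((1 : Nat) : Int) = (1 : Int) by simp] at h
    rw [h, pow_one, mul_comm C st.1]
    rw [show st.1 * C = n from by rw [← hCm]; ring]
  · rw [if_neg hbig]
    have h1 : st.1 = 1 := by omega
    have hC : C = n := by rw [h1] at hCm; omega
    intro d
    rw [hgen d, hC]

theorem gf_alt_eq (n k : Int) :
    gf_alt n k = bestD k (genD
      (if 1 < ((PySem.List.pyRange 2 (((Nat.sqrt n.toNat : Nat) : Int) + 1)).foldl facStep (n, [])).1 then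
        ((PySem.List.pyRange 2 (((Nat.sqrt n.toNat : Nat) : Int) + 1)).foldl facStep (n, [])).2 ++
          [(((PySem.List.pyRange 2 (((Nat.sqrt n.toNat : Nat) : Int) + 1)).foldl facStep (n, [])).1, 1)]
      else ((PySem.List.pyRange 2 (((Nat.sqrt n.toNat : Nat) : Int) + 1)).foldl facStep (n, [])).2)) := rfl

-- ---------- B is the largest divisor ≤ k ----------
theorem gf_alt_IsBest (n k : Int) (hn : 1 ≤ n) : IsBest n k (gf_alt n k) := by
  have hmem := mem_divisors n hn
  rw [gf_alt_eq]
  set ds := genD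
    (if 1 < ((PySem.List.pyRange 2 (((Nat.sqrt n.toNat : Nat) : Int) + 1)).foldl facStep (n, [])).1 then
      ((PySem.List.pyRange 2 (((Nat.sqrt n.toNat : Nat) : Int) + 1)).foldl facStep (n, [])).2 ++
        [(((PySem.List.pyRange 2 (((Nat.sqrt n.toNat : Nat) : Int) + 1)).foldl facStep (n, [])).1, 1)]
    else ((PySem.List.pyRange 2 (((Nat.sqrt n.toNat : Nat) : Int) + 1)).foldl facStep (n, [])).2) with hds
  refine ⟨?_, ?_, ?_⟩
  · exact bfold_init_le k ds 1
  · rcases bfold_cases k ds 1 with h | ⟨h1, h2⟩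
    · exact Or.inl h
    · exact Or.inr ⟨((hmem _).mp h1).2, h2⟩
  · intro d hd hd1 hdk
    exact bfold_ub k ds 1 d ((hmem d).mpr ⟨hd1, hd⟩) hdk

-- ---------- the n = 0 corner: both return 1 ----------
theorem gf_zero (k : Int) : gf 0 k = 1 := by
  unfold gf
  rw [PySem.List.pyRange_one_eq_nil
    (by simp only [Int.toNat_zero, Nat.sqrt_zero, Nat.cast_zero]; omega)]
  rfl

theorem gf_alt_zero (k : Int) : gf_alt 0 k = 1 := by
  unfold gf_alt
  rw [PySem.List.pyRange_one_eq_nil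
    (by simp only [Int.toNat_zero, Nat.sqrt_zero, Nat.cast_zero]; omega)]
  simp [genD, bestD]


-- ===== VERDICT (by name: the statement is the Claim_ definition above) =====
theorem gf_spec : Claim_equal_gf := by
  intro n k _ hpre
  unfold Spec_gf
  rcases eq_or_lt_of_le hpre with h | h
  · rw [← h, gf_zero, gf_alt_zero]
  · exact best_unique (gf_IsBest n k (by omega)) (gf_alt_IsBest n k (by omega))
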